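-- pv_equiv track=rewrite | github.com/tsujike/Python-int1 | 初級1-1.py | count_onigiris_from_string
-- ===== SOURCE A (Python) =====
-- def count_onigiris_from_string(data):
--     """
--     文字列データから、おにぎりの名前をキー、登場した回数を値とする辞書を生成します。
--     :param data: おにぎりの名前がカンマ区切りで格納された文字列
--     :return: おにぎりの名前と登場回数の辞書
--     """
--     onigiri_count = {}
--     onigiris = data.split(',')
--
--     for onigiri in onigiris:
--         if onigiri in onigiri_count:
--             onigiri_count[onigiri] += 1
--         else:
--             onigiri_count[onigiri] = 1
--
--     return onigiri_count
-- ===== SOURCE B (Python) =====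
-- def count_onigiris_from_string(data):
--     """Recursive peel-and-count: take the first name, count its occurrences,
--     drop all its copies, and recurse on what is left. No dict is updated
--     during a scan; first-seen key order falls out of the recursion."""
--     def go(names):
--         if not names:
--             return {}
--         head = names[0]
--         rest = names[1:]
--         result = {head: 1 + rest.count(head)}
--         result.update(go([x for x in rest if x != head]))
--         return result
--     return go(data.split(','))
-- ===== Notes on version B (the rewrite author's own statement) =====
-- stated objective: alternative
-- what changed: B replaces A's single-pass dict-increment loop by a recursive peel-and-count: count the first name, filter out its copies, recurse on the remainder.
import Mathlib
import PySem

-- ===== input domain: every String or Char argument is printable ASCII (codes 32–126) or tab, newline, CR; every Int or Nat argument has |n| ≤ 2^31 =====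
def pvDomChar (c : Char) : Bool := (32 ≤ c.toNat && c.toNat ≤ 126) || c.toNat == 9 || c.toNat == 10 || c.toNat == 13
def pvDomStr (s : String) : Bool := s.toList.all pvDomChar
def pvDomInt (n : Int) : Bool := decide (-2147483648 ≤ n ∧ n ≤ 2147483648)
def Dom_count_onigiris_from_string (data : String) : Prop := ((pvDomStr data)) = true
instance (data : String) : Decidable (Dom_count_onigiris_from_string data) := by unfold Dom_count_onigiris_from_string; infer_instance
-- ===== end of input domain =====

-- B replaces A's dict-increment scan by a recursive peel-and-count (count the first name, drop its copies, recurse); alternative decomposition, same result.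
-- ===== PORT A =====
def count_onigiris_from_string (data : String) : List (String × Int) :=
  let onigiris := (PySem.Str.split? data ",").getD []
  (onigiris.foldl
      (fun d o => if d.contains o then d.modify o 0 (· + 1) else d.insert o 1)
      PySem.Dict.empty).items

-- ===== PORT B =====
-- helper go: {head: 1 + rest.count(head)} followed by the recursion on rest without head
def goCount : List String → List (String × Int)
  | [] => []
  | h :: t =>
      (h, 1 + (PySem.List.count t h : Int)) :: goCount (t.filter (fun x => x != h))
termination_by l => l.length
decreasing_by
  have := List.length_filter_le (fun x => x != h) t
  simp; omega

def count_onigiris_from_string_alt (data : String) : List (String × Int) :=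
  goCount ((PySem.Str.split? data ",").getD [])

-- ===== PRECONDITION & SPEC =====
def Spec_count_onigiris_from_string (data : String) (out : List (String × Int)) : Prop := out = count_onigiris_from_string_alt data
instance (data : String) (out : List (String × Int)) : Decidable (Spec_count_onigiris_from_string data out) := by unfold Spec_count_onigiris_from_string; infer_instance

-- ===== CLAIM (what is proved, stated in full; the proofs are below) =====
def Claim_equal_count_onigiris_from_string : Prop := ∀ (data : String), Dom_count_onigiris_from_string data → Spec_count_onigiris_from_string data (count_onigiris_from_string data)

-- ===== LEMMAS AND PROOFS =====

-- A's loop body is exactly Dict.modify (counting with default 0)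
theorem step_eq_modify (d : PySem.Dict String Int) (k : String) :
    (if d.contains k then d.modify k 0 (· + 1) else d.insert k 1) = d.modify k 0 (· + 1) := by
  by_cases h : d.contains k = true
  · simp [h]
  · simp [eq_false_of_ne_true h, PySem.Dict.modify,
      PySem.Dict.getD_of_not_contains d 0 (eq_false_of_ne_true h)]

-- skipping over an already-seen element: folding add starting from a set containing h ignores copies of h
theorem foldl_add_filter (h : String) :
    ∀ (t : List String) (s : PySem.Set String), h ∈ s →
      t.foldl PySem.Set.add s = (t.filter (fun x => x != h)).foldl PySem.Set.add s := by
  intro t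
  induction t with
  | nil => intro s _; rfl
  | cons x xs ih =>
      intro s hs
      by_cases hx : x = h
      · subst hx
        have hc : PySem.Set.add s x = s := by
          simp [PySem.Set.add, hs]
        simp only [List.foldl, List.filter_cons, bne_self_eq_false, hc, ih s hs,
          Bool.false_eq_true, ite_false]
      · have hf : List.filter (fun y => y != h) (x :: xs) = x :: List.filter (fun y => y != h) xs := by
          simp [hx]
        rw [List.foldl, hf, List.foldl,
          ih (PySem.Set.add s x) (by simp [PySem.Set.add]; split <;> simp [hs])]

-- folding add from [h] over elements all ≠ h just prepends h
theorem foldl_add_cons_head (h : String) :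
    ∀ (t : List String) (s : PySem.Set String), (∀ x ∈ t, x ≠ h) → h ∉ s →
      t.foldl PySem.Set.add (h :: s) = h :: t.foldl PySem.Set.add s := by
  intro t
  induction t with
  | nil => intro s _ _; rfl
  | cons x xs ih =>
      intro s hall hns
      have hx : x ≠ h := hall x (by simp)
      have hadd : PySem.Set.add (h :: s) x = h :: PySem.Set.add s x := by
        simp [PySem.Set.add, hx]
        split <;> simp
      rw [List.foldl, hadd, ih (PySem.Set.add s x)
        (fun y hy => hall y (by simp [hy]))
        (by simp [PySem.Set.add]; split <;> simp [hns, Ne.symm hx])]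
      rfl

-- first-seen dedup peels its head: ofList (h::t) = h :: ofList (t with copies of h removed)
theorem ofList_cons_peel (h : String) (t : List String) :
    PySem.Set.ofList (h :: t) = h :: PySem.Set.ofList (t.filter (fun x => x != h)) := by
  have e1 : PySem.Set.ofList (h :: t) = t.foldl PySem.Set.add [h] := by
    rw [PySem.Set.ofList_eq_foldl]; rfl
  rw [e1, foldl_add_filter h t [h] (by simp)]
  have : ([h] : PySem.Set String) = h :: ([] : PySem.Set String) := rfl
  rw [this, foldl_add_cons_head h _ []
    (by intro x hx; simp at hx; exact hx.2) (by simp)]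
  rw [PySem.Set.ofList_eq_foldl]

-- A's whole loop on any name list yields B's peel-and-count recursion
theorem fold_items : ∀ (l : List String),
    (l.foldl (fun d o => if d.contains o then d.modify o 0 (· + 1) else d.insert o 1)
        PySem.Dict.empty).items = goCount l := by
  intro l
  have hfun : (fun (d : PySem.Dict String Int) o =>
      if d.contains o then d.modify o 0 (· + 1) else d.insert o 1)
      = fun d o => d.modify o 0 (· + 1) := by
    funext d o; exact step_eq_modify d o
  rw [hfun, ← PySem.Dict.counter_eq_foldl, PySem.Dict.items_counter]
  -- now prove the dedup/count form equals goCount, by strong induction on length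
  suffices h : ∀ (n : Nat) (l : List String), l.length ≤ n →
      (PySem.Set.ofList l).map (fun k => (k, (l.count k : Int))) = goCount l by
    exact h l.length l le_rfl
  intro n
  induction n with
  | zero =>
      intro l hl
      have : l = [] := List.eq_nil_of_length_eq_zero (Nat.le_zero.mp hl)
      subst this; simp [goCount]
  | succ n ih =>
      intro l hl
      match l with
      | [] => simp [goCount]
      | h :: t =>
          rw [ofList_cons_peel, goCount]
          have hlen : (t.filter (fun x => x != h)).length ≤ n := by
            have := List.length_filter_le (fun x => x != h) t
            simp at hl; omega
          rw [List.map_cons]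
          congr 1
          · simp [Int.add_comm]
          · rw [← ih (t.filter (fun x => x != h)) hlen]
            apply List.map_congr_left
            intro k hk
            have hkmem : k ∈ t.filter (fun x => x != h) := by
              exact (PySem.Set.mem_ofList _ _).mp hk
            have hkne : k ≠ h := by
              have := List.of_mem_filter hkmem
              simpa using this
            have hcf : (t.filter (fun x => x != h)).count k = t.count k := by
              simp [List.count_filter, hkne]
            simp [Ne.symm hkne, hcf]

-- ===== VERDICT (by name: the statement is the Claim_ definition above) =====
theorem count_onigiris_from_string_spec : Claim_equal_count_onigiris_from_string := by
  intro data _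
  unfold Spec_count_onigiris_from_string
  unfold count_onigiris_from_string count_onigiris_from_string_alt
  exact fold_items ((PySem.Str.split? data ",").getD [])
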